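-- pv_equiv track=rewrite | github.com/CatherineG77/Algorithm2025_PJ1_DNA | DNA_.py | compute_dp
-- ===== SOURCE A (Python) =====
-- def compute_dp(query, ref):
--     # 计算 dp 数组，得到从query的i下标开头和ref的j下标开头的最长公共前缀长度表格"""
--     n, m = len(query), len(ref)
--     dp = [[0] * (m + 1) for _ in range(n + 1)]
--     # 从后向前填表
--     for i in range(n - 1, -1, -1):
--         for j in range(m - 1, -1, -1):
--             if query[i] == ref[j]:
--                 dp[i][j] = dp[i+1][j+1] + 1
--             else:
--                 dp[i][j] = 0
--     return dp
-- ===== SOURCE B (Python) =====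
-- def compute_dp(query, ref):
--     # Each cell is computed directly and independently: dp[i][j] is the length
--     # of the longest common prefix of the suffixes query[i:] and ref[j:],
--     # counted by scanning forward from (i, j) until the first mismatch.
--     # No DP table, no recurrence, no neighbour lookups.
--     n, m = len(query), len(ref)
--     def lcp(i, j):
--         k = 0
--         while i + k < n and j + k < m and query[i + k] == ref[j + k]:
--             k += 1
--         return k
--     return [[lcp(i, j) for j in range(m + 1)] for i in range(n + 1)]
-- ===== Notes on version B (the rewrite author's own statement) =====
-- stated objective: alternative
-- what changed: Drops the DP entirely: instead of filling a table backwards with the recurrence dp[i][j]=dp[i+1][j+1]+1, B computes each cell independently as the common-prefix length of the suffixes query[i:] and ref[j:] by a direct forward scan from (i,j); no table state or neighbour lookup is used.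
import Mathlib
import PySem

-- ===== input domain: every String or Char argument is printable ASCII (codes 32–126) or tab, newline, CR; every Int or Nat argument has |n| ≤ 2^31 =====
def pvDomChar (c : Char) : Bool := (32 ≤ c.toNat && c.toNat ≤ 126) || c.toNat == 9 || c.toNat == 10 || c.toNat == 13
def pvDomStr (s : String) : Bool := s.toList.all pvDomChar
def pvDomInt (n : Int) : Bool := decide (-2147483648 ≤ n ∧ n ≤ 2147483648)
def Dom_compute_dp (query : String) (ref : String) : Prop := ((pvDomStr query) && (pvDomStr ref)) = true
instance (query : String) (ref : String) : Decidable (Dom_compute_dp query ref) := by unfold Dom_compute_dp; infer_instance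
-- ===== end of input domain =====

-- B drops A's backward-filled DP table: each cell is computed independently as the
-- common-prefix length of the two suffixes, by direct scan (objective: alternative).

-- ===== PORT A =====
-- body of A's inner loop: dp[i][j] = dp[i+1][j+1]+1 if query[i]==ref[j] else 0
def pvBodyA (qs rs : List Char) (dp : List (List Int)) (i j : Int) : List (List Int) :=
  let v : Int :=
    if PySem.List.pyGetD qs i ' ' = PySem.List.pyGetD rs j ' ' then
      PySem.List.pyGetD (PySem.List.pyGetD dp (i + 1) []) (j + 1) 0 + 1
    else 0
  PySem.List.pySetD dp i (PySem.List.pySetD (PySem.List.pyGetD dp i []) j v)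

def compute_dp (query : String) (ref : String) : List (List Int) :=
  let qs := query.toList
  let rs := ref.toList
  let n := qs.length
  let m := rs.length
  (PySem.List.pyRange ((n : Int) - 1) (-1) (-1)).foldl
    (fun dp i =>
      (PySem.List.pyRange ((m : Int) - 1) (-1) (-1)).foldl
        (fun dp j => pvBodyA qs rs dp i j) dp)
    (List.replicate (n + 1) (List.replicate (m + 1) (0 : Int)))

-- ===== PORT B =====
-- the helper lcp: k = 0; while i+k < n and j+k < m and query[i+k] == ref[j+k]: k += 1
def pvLcpGoB (qs rs : List Char) (i j k : Nat) : Nat :=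
  -- the guarded query[i+k] == ref[j+k] (evaluated only in range) is exact as getD here
  if i + k < qs.length ∧ j + k < rs.length ∧ qs.getD (i + k) ' ' = rs.getD (j + k) ' ' then
    pvLcpGoB qs rs i j (k + 1)
  else k
termination_by qs.length - (i + k)
decreasing_by omega

-- [[lcp(i, j) for j in range(m + 1)] for i in range(n + 1)]
def compute_dp_alt (query : String) (ref : String) : List (List Int) :=
  let qs := query.toList
  let rs := ref.toList
  let n := qs.length
  let m := rs.length
  (List.range (n + 1)).map (fun (i : Nat) =>
    (List.range (m + 1)).map (fun (j : Nat) =>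
      (pvLcpGoB qs rs i j 0 : Int)))

-- ===== PRECONDITION & SPEC =====
def Spec_compute_dp (query : String) (ref : String) (out : List (List Int)) : Prop := out = compute_dp_alt query ref
instance (query : String) (ref : String) (out : List (List Int)) : Decidable (Spec_compute_dp query ref out) := by unfold Spec_compute_dp; infer_instance

-- ===== CLAIM (what is proved, stated in full; the proofs are below) =====
def Claim_equal_compute_dp : Prop := ∀ (query : String) (ref : String), Dom_compute_dp query ref → Spec_compute_dp query ref (compute_dp query ref)

-- ===== LEMMAS AND PROOFS =====

-- length of the longest common prefix of two suffixes
def pvLcp : List Char → List Char → Int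
  | a :: as, b :: bs => if a = b then pvLcp as bs + 1 else 0
  | _, _ => 0

-- the intended row for query-suffix s: entry j is lcp(s, ref[j:])
def pvRow (rs : List Char) (s : List Char) : List Int :=
  (List.range (rs.length + 1)).map (fun j => pvLcp s (rs.drop j))

-- the intended full table
def pvTarget (qs rs : List Char) : List (List Int) :=
  (List.range (qs.length + 1)).map (fun i => pvRow rs (qs.drop i))

-- A's table state after the rows ≥ t have been filled
def pvTab (qs rs : List Char) (t : Nat) : List (List Int) :=
  (List.range (qs.length + 1)).map
    (fun k => if t ≤ k then pvRow rs (qs.drop k) else List.replicate (rs.length + 1) 0)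

-- A's row-i state after the entries ≥ t have been filled
def pvRowPart (qs rs : List Char) (i t : Nat) : List Int :=
  (List.range (rs.length + 1)).map
    (fun l => if t ≤ l then pvLcp (qs.drop i) (rs.drop l) else 0)

theorem pvLcp_nil_right (s : List Char) : pvLcp s [] = 0 := by
  cases s <;> rfl

theorem pvLcp_nil_left (s : List Char) : pvLcp [] s = 0 := by
  cases s <;> rfl

theorem pvLcp_drop (qs rs : List Char) (i j : Nat) (hi : i < qs.length) (hj : j < rs.length) :
    pvLcp (qs.drop i) (rs.drop j)
      = if qs[i] = rs[j] then pvLcp (qs.drop (i + 1)) (rs.drop (j + 1)) + 1 else 0 := by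
  rw [List.drop_eq_getElem_cons hi, List.drop_eq_getElem_cons hj]
  rfl

theorem pvRow_nil (rs : List Char) : pvRow rs [] = List.replicate (rs.length + 1) 0 := by
  apply List.ext_getElem
  · simp [pvRow]
  · intro k h1 h2
    simp [pvRow, pvLcp_nil_left]

-- ---- B side ----

theorem pvLcpGoB_eq (qs rs : List Char) (i j : Nat) :
    ∀ (d k : Nat), qs.length - (i + k) ≤ d →
      (pvLcpGoB qs rs i j k : Int) = (k : Int) + pvLcp (qs.drop (i + k)) (rs.drop (j + k)) := by
  intro d
  induction d with
  | zero =>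
      intro k hd
      rw [pvLcpGoB]
      rw [if_neg (by omega)]
      rw [show List.drop (i + k) qs = [] from List.drop_eq_nil_of_le (by omega), pvLcp_nil_left]
      ring
  | succ d ih =>
      intro k hd
      rw [pvLcpGoB]
      split
      · next h =>
          rw [ih (k + 1) (by omega)]
          have he : qs[i + k]'h.1 = rs[j + k]'h.2.1 :=
            calc qs[i + k]'h.1 = qs.getD (i + k) ' ' := (List.getD_eq_getElem qs _ h.1).symm
              _ = rs.getD (j + k) ' ' := h.2.2
              _ = rs[j + k]'h.2.1 := List.getD_eq_getElem rs _ h.2.1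
          rw [pvLcp_drop qs rs (i + k) (j + k) h.1 h.2.1, if_pos he]
          have h1 : i + (k + 1) = i + k + 1 := by omega
          have h2 : j + (k + 1) = j + k + 1 := by omega
          rw [h1, h2]
          push_cast
          ring
      · next h =>
          by_cases hq : i + k < qs.length
          · by_cases hr : j + k < rs.length
            · have hne : qs[i + k] ≠ rs[j + k] := by
                intro he
                exact h ⟨hq, hr, by
                  rw [List.getD_eq_getElem qs _ hq, List.getD_eq_getElem rs _ hr]; exact he⟩
              rw [pvLcp_drop qs rs (i + k) (j + k) hq hr, if_neg hne]
              ring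
            · rw [show List.drop (j + k) rs = [] from List.drop_eq_nil_of_le (by omega),
                pvLcp_nil_right]
              ring
          · rw [show List.drop (i + k) qs = [] from List.drop_eq_nil_of_le (by omega),
              pvLcp_nil_left]
            ring

theorem compute_dp_alt_eq (query ref : String) :
    compute_dp_alt query ref = pvTarget query.toList ref.toList := by
  simp only [compute_dp_alt, pvTarget, pvRow]
  refine List.map_congr_left ?_
  intro i _
  refine List.map_congr_left ?_
  intro j _
  rw [pvLcpGoB_eq query.toList ref.toList i j (query.toList.length) 0 (by omega)]
  simp

-- ---- A side ----

theorem pvRowPart_top (qs rs : List Char) (i : Nat) :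
    pvRowPart qs rs i rs.length = List.replicate (rs.length + 1) 0 := by
  apply List.ext_getElem
  · simp [pvRowPart]
  · intro k h1 h2
    simp only [pvRowPart, List.getElem_map, List.getElem_range, List.getElem_replicate]
    have hk : k < rs.length + 1 := by simpa [pvRowPart] using h1
    by_cases h : rs.length ≤ k
    · have : k = rs.length := by omega
      simp [this, List.drop_length, pvLcp_nil_right]
    · simp [h]

theorem pvRowPart_zero (qs rs : List Char) (i : Nat) :
    pvRowPart qs rs i 0 = pvRow rs (qs.drop i) := by
  simp [pvRowPart, pvRow]

theorem pvTab_start (qs rs : List Char) (i : Nat) (_hi : i < qs.length) :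
    (pvTab qs rs (i + 1)).set i (pvRowPart qs rs i rs.length) = pvTab qs rs (i + 1) := by
  rw [pvRowPart_top]
  apply List.ext_getElem
  · simp [pvTab]
  · intro k h1 h2
    rw [List.getElem_set]
    split
    · next h =>
        subst h
        simp only [pvTab, List.getElem_map, List.getElem_range]
        rw [if_neg (by omega)]
    · rfl

theorem pvTab_finish (qs rs : List Char) (i : Nat) (_hi : i < qs.length) :
    (pvTab qs rs (i + 1)).set i (pvRowPart qs rs i 0) = pvTab qs rs i := by
  rw [pvRowPart_zero]
  apply List.ext_getElem
  · simp [pvTab]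
  · intro k h1 h2
    have hk : k < qs.length + 1 := by simpa [pvTab] using h2
    rw [List.getElem_set]
    simp only [pvTab, List.getElem_map, List.getElem_range]
    split
    · next h => subst h; simp
    · next h =>
        by_cases hik : i + 1 ≤ k
        · simp [hik, show i ≤ k by omega]
        · simp [hik, show ¬ i ≤ k by omega]

theorem pvBodyA_step (qs rs : List Char) (i j : Nat) (hi : i < qs.length) (hj : j < rs.length) :
    pvBodyA qs rs ((pvTab qs rs (i + 1)).set i (pvRowPart qs rs i (j + 1))) (i : Int) (j : Int)
      = (pvTab qs rs (i + 1)).set i (pvRowPart qs rs i j) := by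
  unfold pvBodyA
  have hcast1 : ((i : Int) + 1) = ((i + 1 : Nat) : Int) := by push_cast; ring
  have hcast2 : ((j : Int) + 1) = ((j + 1 : Nat) : Int) := by push_cast; ring
  rw [hcast1, hcast2]
  simp only [PySem.List.pyGetD_natCast, PySem.List.pySetD_natCast]
  have hdplen : ((pvTab qs rs (i + 1)).set i (pvRowPart qs rs i (j + 1))).length = qs.length + 1 := by
    simp [pvTab]
  have hrow1 : ((pvTab qs rs (i + 1)).set i (pvRowPart qs rs i (j + 1))).getD (i + 1) []
      = pvRow rs (qs.drop (i + 1)) := by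
    rw [List.getD_eq_getElem _ _ (by omega)]
    rw [List.getElem_set_ne (by omega)]
    simp [pvTab]
  have hrow2 : ((pvTab qs rs (i + 1)).set i (pvRowPart qs rs i (j + 1))).getD i []
      = pvRowPart qs rs i (j + 1) := by
    rw [List.getD_eq_getElem _ _ (by omega)]
    rw [List.getElem_set_self (by omega)]
  rw [hrow1, hrow2]
  have hv : (if qs.getD i ' ' = rs.getD j ' ' then (pvRow rs (qs.drop (i + 1))).getD (j + 1) 0 + 1 else 0)
      = pvLcp (qs.drop i) (rs.drop j) := by
    rw [List.getD_eq_getElem qs _ (by omega), List.getD_eq_getElem rs _ (by omega)]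
    rw [List.getD_eq_getElem _ _ (by simp [pvRow]; omega)]
    rw [pvLcp_drop qs rs i j hi hj]
    simp [pvRow]
  rw [hv]
  rw [List.set_set]
  congr 1
  apply List.ext_getElem
  · simp [pvRowPart]
  · intro l h1 h2
    have hl : l < rs.length + 1 := by simpa [pvRowPart] using h2
    rw [List.getElem_set]
    simp only [pvRowPart, List.getElem_map, List.getElem_range]
    split
    · next h => subst h; simp
    · next h =>
        by_cases hjl : j + 1 ≤ l
        · simp [hjl, show j ≤ l by omega]
        · simp [hjl, show ¬ j ≤ l by omega]

theorem pvInnerA (qs rs : List Char) (i : Nat) (hi : i < qs.length) :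
    ∀ t, t ≤ rs.length →
      (List.range t).foldl
          (fun dp (k : Nat) => pvBodyA qs rs dp (i : Int) ((rs.length : Int) - 1 - (k : Int)))
          ((pvTab qs rs (i + 1)).set i (pvRowPart qs rs i rs.length))
        = (pvTab qs rs (i + 1)).set i (pvRowPart qs rs i (rs.length - t)) := by
  intro t
  induction t with
  | zero => simp
  | succ t ih =>
      intro ht
      rw [List.range_succ, List.foldl_append, ih (by omega)]
      simp only [List.foldl_cons, List.foldl_nil]
      have hj : ((rs.length : Int) - 1 - (t : Int)) = ((rs.length - 1 - t : Nat) : Int) := by omega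
      rw [hj]
      have h1 : rs.length - t = (rs.length - 1 - t) + 1 := by omega
      rw [h1, pvBodyA_step qs rs i (rs.length - 1 - t) hi (by omega)]
      congr 2
      omega

theorem pvOuterA (qs rs : List Char) :
    ∀ t, t ≤ qs.length →
      (List.range t).foldl
          (fun dp (k : Nat) =>
            (PySem.List.pyRange ((rs.length : Int) - 1) (-1) (-1)).foldl
              (fun dp j => pvBodyA qs rs dp ((qs.length : Int) - 1 - (k : Int)) j) dp)
          (pvTab qs rs qs.length)
        = pvTab qs rs (qs.length - t) := by
  intro t
  induction t with
  | zero => simp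
  | succ t ih =>
      intro ht
      rw [List.range_succ, List.foldl_append, ih (by omega)]
      simp only [List.foldl_cons, List.foldl_nil]
      have hi : ((qs.length : Int) - 1 - (t : Int)) = ((qs.length - 1 - t : Nat) : Int) := by omega
      rw [hi]
      set i := qs.length - 1 - t with hidef
      have hilt : i < qs.length := by omega
      have h1 : qs.length - t = i + 1 := by omega
      rw [h1]
      have hrange : PySem.List.pyRange ((rs.length : Int) - 1) (-1) (-1)
          = (List.range rs.length).map (fun (k : Nat) => (rs.length : Int) - 1 - (k : Int)) := by
        have hτ : (((rs.length : Int) - 1) - (-1)).toNat = rs.length := by omega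
        rw [PySem.List.pyRange_neg_one, hτ]
      rw [hrange, List.foldl_map]
      rw [← pvTab_start qs rs i hilt]
      rw [pvInnerA qs rs i hilt rs.length (le_refl _)]
      simp only [Nat.sub_self]
      rw [pvTab_finish qs rs i hilt]
      congr 1
      omega

theorem pvTab_init (qs rs : List Char) :
    List.replicate (qs.length + 1) (List.replicate (rs.length + 1) (0 : Int)) = pvTab qs rs qs.length := by
  apply List.ext_getElem
  · simp [pvTab]
  · intro k h1 h2
    simp only [pvTab, List.getElem_map, List.getElem_range, List.getElem_replicate]
    by_cases h : qs.length ≤ k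
    · have hk : k < qs.length + 1 := by simpa using h1
      have : k = qs.length := by omega
      simp [this, List.drop_length, pvRow_nil]
    · simp [h]

theorem pvTab_zero (qs rs : List Char) : pvTab qs rs 0 = pvTarget qs rs := by
  simp [pvTab, pvTarget]

theorem compute_dp_eq (query ref : String) :
    compute_dp query ref = pvTarget query.toList ref.toList := by
  unfold compute_dp
  simp only []
  have houter : PySem.List.pyRange ((query.toList.length : Int) - 1) (-1) (-1)
      = (List.range query.toList.length).map
          (fun k : Nat => (query.toList.length : Int) - 1 - (k : Int)) := by
    have hτ : (((query.toList.length : Int) - 1) - (-1)).toNat = query.toList.length := by omega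
    rw [PySem.List.pyRange_neg_one, hτ]
  rw [houter, List.foldl_map, pvTab_init query.toList ref.toList]
  rw [pvOuterA query.toList ref.toList query.toList.length (le_refl _)]
  simp [pvTab_zero]

-- ===== VERDICT (by name: the statement is the Claim_ definition above) =====
theorem compute_dp_spec : Claim_equal_compute_dp := by
  intro query ref _
  show compute_dp query ref = compute_dp_alt query ref
  rw [compute_dp_eq, compute_dp_alt_eq]
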